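-- pv_equiv track=rewrite | github.com/shreyash-sj10/AYUDIET-LLM_MODEL | data_utils_enhanced.py | get_default_ayurvedic_properties
-- ===== SOURCE A (Python) =====
-- from typing import Dict, Optional, Any, List, Tuple
--
-- def get_default_ayurvedic_properties(food_name: str) -> Dict[str, str]:
--     """
--     Get default Ayurvedic properties based on food categorization
--     """
--     food_lower = food_name.lower()
--
--     # Grain properties
--     if any(grain in food_lower for grain in ['rice', 'wheat', 'bread', 'roti']):
--         return {
--             'rasa': 'Sweet',
--             'virya': 'Cooling',
--             'vipaka': 'Sweet',
--             'vata_effect': 'Balancing',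
--             'pitta_effect': 'Balancing',
--             'kapha_effect': 'Increasing',
--             'digestibility': 'Easy'
--         }
--
--     # Vegetable properties
--     elif any(veg in food_lower for veg in ['spinach', 'kale', 'bitter', 'gourd']):
--         return {
--             'rasa': 'Bitter, Astringent',
--             'virya': 'Cooling',
--             'vipaka': 'Pungent',
--             'vata_effect': 'Increasing',
--             'pitta_effect': 'Balancing',
--             'kapha_effect': 'Balancing',
--             'digestibility': 'Moderate'
--         }
--
--     # Legume properties
--     elif any(dal in food_lower for dal in ['dal', 'lentil', 'bean', 'chickpea']):
--         return {
--             'rasa': 'Sweet, Astringent',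
--             'virya': 'Cooling',
--             'vipaka': 'Sweet',
--             'vata_effect': 'Neutral',
--             'pitta_effect': 'Balancing',
--             'kapha_effect': 'Neutral',
--             'digestibility': 'Moderate'
--         }
--
--     # Spice properties
--     elif any(spice in food_lower for spice in ['ginger', 'garlic', 'chili', 'pepper']):
--         return {
--             'rasa': 'Pungent',
--             'virya': 'Heating',
--             'vipaka': 'Pungent',
--             'vata_effect': 'Balancing',
--             'pitta_effect': 'Increasing',
--             'kapha_effect': 'Balancing',
--             'digestibility': 'Easy'
--         }
--
--     # Default properties
--     else:
--         return {
--             'rasa': 'Sweet',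
--             'virya': 'Neutral',
--             'vipaka': 'Sweet',
--             'vata_effect': 'Neutral',
--             'pitta_effect': 'Neutral',
--             'kapha_effect': 'Neutral',
--             'digestibility': 'Moderate'
--         }
-- ===== SOURCE B (Python) =====
-- _KEYWORD_CATEGORY = {
--     'rice': 0, 'wheat': 0, 'bread': 0, 'roti': 0,
--     'spinach': 1, 'kale': 1, 'bitter': 1, 'gourd': 1,
--     'dal': 2, 'lentil': 2, 'bean': 2, 'chickpea': 2,
--     'ginger': 3, 'garlic': 3, 'chili': 3, 'pepper': 3,
-- }
--
-- # one column per property: values for categories 0..3 and the default (index 4)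
-- _PROPERTY_COLUMNS = {
--     'rasa': ['Sweet', 'Bitter, Astringent', 'Sweet, Astringent', 'Pungent', 'Sweet'],
--     'virya': ['Cooling', 'Cooling', 'Cooling', 'Heating', 'Neutral'],
--     'vipaka': ['Sweet', 'Pungent', 'Sweet', 'Pungent', 'Sweet'],
--     'vata_effect': ['Balancing', 'Increasing', 'Neutral', 'Balancing', 'Neutral'],
--     'pitta_effect': ['Balancing', 'Balancing', 'Balancing', 'Increasing', 'Neutral'],
--     'kapha_effect': ['Increasing', 'Balancing', 'Neutral', 'Balancing', 'Neutral'],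
--     'digestibility': ['Easy', 'Moderate', 'Moderate', 'Easy', 'Moderate'],
-- }
--
--
-- def get_default_ayurvedic_properties(food_name: str):
--     food_lower = food_name.lower()
--     category = min((c for kw, c in _KEYWORD_CATEGORY.items() if kw in food_lower),
--                    default=4)
--     return {prop: column[category] for prop, column in _PROPERTY_COLUMNS.items()}
-- ===== Notes on version B (the rewrite author's own statement) =====
-- stated objective: alternative
-- what changed: Replaces the hard-coded if/elif chain of branch-local result dicts by an arg-min over a keyword-to-category map (min with default) followed by assembling the result dict from per-property value columns indexed by the category.
import Mathlib
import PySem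

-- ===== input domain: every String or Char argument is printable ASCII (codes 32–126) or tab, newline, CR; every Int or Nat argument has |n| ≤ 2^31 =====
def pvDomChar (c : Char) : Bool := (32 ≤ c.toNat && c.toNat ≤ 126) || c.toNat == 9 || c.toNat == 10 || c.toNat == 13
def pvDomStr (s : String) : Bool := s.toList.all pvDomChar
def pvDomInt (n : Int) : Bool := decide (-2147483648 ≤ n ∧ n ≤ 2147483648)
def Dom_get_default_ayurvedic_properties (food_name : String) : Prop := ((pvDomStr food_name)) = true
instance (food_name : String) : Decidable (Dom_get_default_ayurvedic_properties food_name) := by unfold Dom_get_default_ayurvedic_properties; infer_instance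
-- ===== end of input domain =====

-- B replaces A's if/elif chain by an arg-min over a keyword→category map followed by a
-- columnar dict assembly (one value column per property, indexed by the category).

-- ===== PORT A =====
-- literal transliteration of A: lower once, then the if/elif chain with `any(kw in food_lower ...)`
def get_default_ayurvedic_properties (food_name : String) : List (String × String) :=
  let food_lower := PySem.Str.lower food_name
  if ["rice", "wheat", "bread", "roti"].any (fun grain => PySem.Str.isIn grain food_lower) then
    [("rasa", "Sweet"), ("virya", "Cooling"), ("vipaka", "Sweet"),
     ("vata_effect", "Balancing"), ("pitta_effect", "Balancing"),
     ("kapha_effect", "Increasing"), ("digestibility", "Easy")]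
  else if ["spinach", "kale", "bitter", "gourd"].any (fun veg => PySem.Str.isIn veg food_lower) then
    [("rasa", "Bitter, Astringent"), ("virya", "Cooling"), ("vipaka", "Pungent"),
     ("vata_effect", "Increasing"), ("pitta_effect", "Balancing"),
     ("kapha_effect", "Balancing"), ("digestibility", "Moderate")]
  else if ["dal", "lentil", "bean", "chickpea"].any (fun dal => PySem.Str.isIn dal food_lower) then
    [("rasa", "Sweet, Astringent"), ("virya", "Cooling"), ("vipaka", "Sweet"),
     ("vata_effect", "Neutral"), ("pitta_effect", "Balancing"),
     ("kapha_effect", "Neutral"), ("digestibility", "Moderate")]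
  else if ["ginger", "garlic", "chili", "pepper"].any (fun spice => PySem.Str.isIn spice food_lower) then
    [("rasa", "Pungent"), ("virya", "Heating"), ("vipaka", "Pungent"),
     ("vata_effect", "Balancing"), ("pitta_effect", "Increasing"),
     ("kapha_effect", "Balancing"), ("digestibility", "Easy")]
  else
    [("rasa", "Sweet"), ("virya", "Neutral"), ("vipaka", "Sweet"),
     ("vata_effect", "Neutral"), ("pitta_effect", "Neutral"),
     ("kapha_effect", "Neutral"), ("digestibility", "Moderate")]

-- ===== PORT B =====
-- Source B's _KEYWORD_CATEGORY dict (association list, insertion order)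
def ayurKeywordCategory : List (String × Nat) :=
  [("rice", 0), ("wheat", 0), ("bread", 0), ("roti", 0),
   ("spinach", 1), ("kale", 1), ("bitter", 1), ("gourd", 1),
   ("dal", 2), ("lentil", 2), ("bean", 2), ("chickpea", 2),
   ("ginger", 3), ("garlic", 3), ("chili", 3), ("pepper", 3)]

-- Source B's _PROPERTY_COLUMNS dict: one value column per property, categories 0..3 and default 4
def ayurColumns : List (String × List String) :=
  [("rasa", ["Sweet", "Bitter, Astringent", "Sweet, Astringent", "Pungent", "Sweet"]),
   ("virya", ["Cooling", "Cooling", "Cooling", "Heating", "Neutral"]),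
   ("vipaka", ["Sweet", "Pungent", "Sweet", "Pungent", "Sweet"]),
   ("vata_effect", ["Balancing", "Increasing", "Neutral", "Balancing", "Neutral"]),
   ("pitta_effect", ["Balancing", "Balancing", "Balancing", "Increasing", "Neutral"]),
   ("kapha_effect", ["Increasing", "Balancing", "Neutral", "Balancing", "Neutral"]),
   ("digestibility", ["Easy", "Moderate", "Moderate", "Easy", "Moderate"])]

-- min((c for kw, c in _KEYWORD_CATEGORY.items() if kw in food_lower), default=4),
-- then {prop: column[category] for prop, column in _PROPERTY_COLUMNS.items()}
-- (column[category] is always in range: category ≤ 4 and every column has 5 entries,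
-- so the `getD` default "" is never taken)
def get_default_ayurvedic_properties_alt (food_name : String) : List (String × String) :=
  let food_lower := PySem.Str.lower food_name
  let category :=
    PySem.List.minD
      ((ayurKeywordCategory.filter (fun p => PySem.Str.isIn p.1 food_lower)).map Prod.snd)
      id 4
  ayurColumns.map (fun p => (p.1, p.2.getD category ""))

-- ===== PRECONDITION & SPEC =====
def Spec_get_default_ayurvedic_properties (food_name : String) (out : List (String × String)) : Prop := out = get_default_ayurvedic_properties_alt food_name
instance (food_name : String) (out : List (String × String)) : Decidable (Spec_get_default_ayurvedic_properties food_name out) := by unfold Spec_get_default_ayurvedic_properties; infer_instance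

-- ===== CLAIM =====
def Claim_equal_get_default_ayurvedic_properties : Prop := ∀ (food_name : String), Dom_get_default_ayurvedic_properties food_name → Spec_get_default_ayurvedic_properties food_name (get_default_ayurvedic_properties food_name)

-- ===== LEMMAS AND PROOFS =====

-- the category list B filters out of the keyword map
def ayurCats (fl : String) : List Nat :=
  (ayurKeywordCategory.filter (fun p => PySem.Str.isIn p.1 fl)).map Prod.snd

lemma ayurCats_mem (fl : String) (c : Nat) (hc : c ∈ ayurCats fl) :
    ∃ kw, (kw, c) ∈ ayurKeywordCategory ∧ PySem.Str.isIn kw fl = true := by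
  simp only [ayurCats, List.mem_map] at hc
  obtain ⟨p, hp, rfl⟩ := hc
  rw [List.mem_filter] at hp
  exact ⟨p.1, hp.1, hp.2⟩

lemma mem_ayurCats (fl : String) (kw : String) (c : Nat)
    (h1 : (kw, c) ∈ ayurKeywordCategory) (h2 : PySem.Str.isIn kw fl = true) :
    c ∈ ayurCats fl := by
  simp only [ayurCats, List.mem_map]
  exact ⟨(kw, c), List.mem_filter.mpr ⟨h1, h2⟩, rfl⟩

-- B's arg-min category equals the index of the first keyword group that matches (A's order)
lemma ayur_cat (fl : String) :
    PySem.List.minD (ayurCats fl) id 4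
      = (if ["rice", "wheat", "bread", "roti"].any (fun kw => PySem.Str.isIn kw fl) then 0
         else if ["spinach", "kale", "bitter", "gourd"].any (fun kw => PySem.Str.isIn kw fl) then 1
         else if ["dal", "lentil", "bean", "chickpea"].any (fun kw => PySem.Str.isIn kw fl) then 2
         else if ["ginger", "garlic", "chili", "pepper"].any (fun kw => PySem.Str.isIn kw fl) then 3
         else 4) := by
  cases h0 : (["rice", "wheat", "bread", "roti"].any (fun kw => PySem.Str.isIn kw fl)) with
  | false =>
    simp only [h0, Bool.false_eq_true, if_false]
    simp only [List.any_eq_false, List.mem_cons, List.not_mem_nil, or_false,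
      forall_eq_or_imp, forall_eq] at h0
    cases h1 : (["spinach", "kale", "bitter", "gourd"].any (fun kw => PySem.Str.isIn kw fl)) with
    | false =>
      simp only [h1, Bool.false_eq_true, if_false]
      simp only [List.any_eq_false, List.mem_cons, List.not_mem_nil, or_false,
        forall_eq_or_imp, forall_eq] at h1
      cases h2 : (["dal", "lentil", "bean", "chickpea"].any (fun kw => PySem.Str.isIn kw fl)) with
      | false =>
        simp only [h2, Bool.false_eq_true, if_false]
        simp only [List.any_eq_false, List.mem_cons, List.not_mem_nil, or_false,
          forall_eq_or_imp, forall_eq] at h2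
        cases h3 : (["ginger", "garlic", "chili", "pepper"].any (fun kw => PySem.Str.isIn kw fl)) with
        | false =>
          simp only [h3, Bool.false_eq_true, if_false]
          simp only [List.any_eq_false, List.mem_cons, List.not_mem_nil, or_false,
            forall_eq_or_imp, forall_eq] at h3
          have hempty : ayurCats fl = [] := by
            rcases hcs : ayurCats fl with _ | ⟨c, t⟩
            · rfl
            · exfalso
              have hc : c ∈ ayurCats fl := by rw [hcs]; exact List.mem_cons_self
              obtain ⟨kw', hkt, hki⟩ := ayurCats_mem fl c hc
              simp only [ayurKeywordCategory, List.mem_cons, Prod.mk.injEq, List.not_mem_nil,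
                or_false] at hkt
              rcases hkt with ⟨rfl, rfl⟩ | ⟨rfl, rfl⟩ | ⟨rfl, rfl⟩ | ⟨rfl, rfl⟩ | ⟨rfl, rfl⟩ | ⟨rfl, rfl⟩ | ⟨rfl, rfl⟩ | ⟨rfl, rfl⟩ | ⟨rfl, rfl⟩ | ⟨rfl, rfl⟩ | ⟨rfl, rfl⟩ | ⟨rfl, rfl⟩ | ⟨rfl, rfl⟩ | ⟨rfl, rfl⟩ | ⟨rfl, rfl⟩ | ⟨rfl, rfl⟩ <;> simp_all
          rw [hempty]
          rfl
        | true =>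
          simp only [h3, eq_self_iff_true, if_true]
          simp only [List.any_eq_true, List.mem_cons, List.not_mem_nil, or_false] at h3
          obtain ⟨kw, hkw, hin⟩ := h3
          have hc : (3 : Nat) ∈ ayurCats fl := by
            rcases hkw with rfl | rfl | rfl | rfl <;> exact mem_ayurCats fl _ 3 (by decide) hin
          cases hmin : PySem.List.min? (ayurCats fl) id with
          | none => rw [PySem.List.min?_eq_none_iff] at hmin; rw [hmin] at hc; simp at hc
          | some m =>
            have hle := PySem.List.min?_isMin hmin 3 hc
            have hmem := PySem.List.min?_mem hmin
            simp only [PySem.List.minD, hmin, Option.getD_some]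
            simp only [id] at hle
            obtain ⟨kw', hkt, hki⟩ := ayurCats_mem fl m hmem
            have hlb : ¬ m < 3 := by
              intro hlt
              interval_cases m <;>
                simp [ayurKeywordCategory] at hkt <;>
                (rcases hkt with rfl | rfl | rfl | rfl) <;> simp_all
            omega
      | true =>
        simp only [h2, eq_self_iff_true, if_true]
        simp only [List.any_eq_true, List.mem_cons, List.not_mem_nil, or_false] at h2
        obtain ⟨kw, hkw, hin⟩ := h2
        have hc : (2 : Nat) ∈ ayurCats fl := by
          rcases hkw with rfl | rfl | rfl | rfl <;> exact mem_ayurCats fl _ 2 (by decide) hin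
        cases hmin : PySem.List.min? (ayurCats fl) id with
        | none => rw [PySem.List.min?_eq_none_iff] at hmin; rw [hmin] at hc; simp at hc
        | some m =>
          have hle := PySem.List.min?_isMin hmin 2 hc
          have hmem := PySem.List.min?_mem hmin
          simp only [PySem.List.minD, hmin, Option.getD_some]
          simp only [id] at hle
          obtain ⟨kw', hkt, hki⟩ := ayurCats_mem fl m hmem
          have hlb : ¬ m < 2 := by
            intro hlt
            interval_cases m <;>
              simp [ayurKeywordCategory] at hkt <;>
              (rcases hkt with rfl | rfl | rfl | rfl) <;> simp_all
          omega
    | true =>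
      simp only [h1, eq_self_iff_true, if_true]
      simp only [List.any_eq_true, List.mem_cons, List.not_mem_nil, or_false] at h1
      obtain ⟨kw, hkw, hin⟩ := h1
      have hc : (1 : Nat) ∈ ayurCats fl := by
        rcases hkw with rfl | rfl | rfl | rfl <;> exact mem_ayurCats fl _ 1 (by decide) hin
      cases hmin : PySem.List.min? (ayurCats fl) id with
      | none => rw [PySem.List.min?_eq_none_iff] at hmin; rw [hmin] at hc; simp at hc
      | some m =>
        have hle := PySem.List.min?_isMin hmin 1 hc
        have hmem := PySem.List.min?_mem hmin
        simp only [PySem.List.minD, hmin, Option.getD_some]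
        simp only [id] at hle
        obtain ⟨kw', hkt, hki⟩ := ayurCats_mem fl m hmem
        have hlb : ¬ m < 1 := by
          intro hlt
          interval_cases m <;>
            simp [ayurKeywordCategory] at hkt <;>
            (rcases hkt with rfl | rfl | rfl | rfl) <;> simp_all
        omega
  | true =>
    simp only [h0, eq_self_iff_true, if_true]
    simp only [List.any_eq_true, List.mem_cons, List.not_mem_nil, or_false] at h0
    obtain ⟨kw, hkw, hin⟩ := h0
    have hc : (0 : Nat) ∈ ayurCats fl := by
      rcases hkw with rfl | rfl | rfl | rfl <;> exact mem_ayurCats fl _ 0 (by decide) hin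
    cases hmin : PySem.List.min? (ayurCats fl) id with
    | none => rw [PySem.List.min?_eq_none_iff] at hmin; rw [hmin] at hc; simp at hc
    | some m =>
      have hle := PySem.List.min?_isMin hmin 0 hc
      simp only [PySem.List.minD, hmin, Option.getD_some]
      simp only [id] at hle
      omega

-- ===== VERDICT =====
theorem get_default_ayurvedic_properties_spec : Claim_equal_get_default_ayurvedic_properties := by
  intro food_name _
  unfold Spec_get_default_ayurvedic_properties get_default_ayurvedic_properties
    get_default_ayurvedic_properties_alt
  have hcat := ayur_cat (PySem.Str.lower food_name)
  simp only [ayurCats] at hcat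
  simp only []
  rw [hcat]
  cases h0 : (["rice", "wheat", "bread", "roti"].any (fun kw => PySem.Str.isIn kw (PySem.Str.lower food_name))) <;>
    cases h1 : (["spinach", "kale", "bitter", "gourd"].any (fun kw => PySem.Str.isIn kw (PySem.Str.lower food_name))) <;>
      cases h2 : (["dal", "lentil", "bean", "chickpea"].any (fun kw => PySem.Str.isIn kw (PySem.Str.lower food_name))) <;>
        cases h3 : (["ginger", "garlic", "chili", "pepper"].any (fun kw => PySem.Str.isIn kw (PySem.Str.lower food_name))) <;>
          simp only [h0, h1, h2, h3, Bool.false_eq_true, eq_self_iff_true, if_true, if_false] <;>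
            rfl
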